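-- pv_equiv track=rewrite | github.com/fumuling/KGQA-Psychological-Counseling | venv/Lib/site-packages/py2neo/experimental/storage.py | enumerate_nodes
-- ===== SOURCE A (Python) =====
-- def enumerate_nodes(iterable):
--     try:
--         size = len(iterable)
--     except TypeError:
--         iterable = list(iterable)
--         size = len(iterable)
--     last = size - 1
--     for i, item in enumerate(iterable):
--         yield -1 if i == last else i, item
-- ===== SOURCE B (Python) =====
-- def enumerate_nodes(iterable):
--     # Lookahead streaming generator: one-element buffer, no len() call.
--     it = iter(iterable)
--     try:
--         prev = it.__next__()
--     except StopIteration: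
--         return
--     i = 0
--     for item in it:
--         yield i, prev
--         prev = item
--         i += 1
--     yield -1, prev
-- ===== Notes on version B (the rewrite author's own statement) =====
-- stated objective: alternative
-- what changed: Replaced the pre-measured len/enumerate pass (with its compare-to-last-index test on every element) by a single-pass streaming generator that keeps a one-element lookahead buffer and a counter, emitting the buffered element with its real index and the final buffered element with -1.
import Mathlib
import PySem

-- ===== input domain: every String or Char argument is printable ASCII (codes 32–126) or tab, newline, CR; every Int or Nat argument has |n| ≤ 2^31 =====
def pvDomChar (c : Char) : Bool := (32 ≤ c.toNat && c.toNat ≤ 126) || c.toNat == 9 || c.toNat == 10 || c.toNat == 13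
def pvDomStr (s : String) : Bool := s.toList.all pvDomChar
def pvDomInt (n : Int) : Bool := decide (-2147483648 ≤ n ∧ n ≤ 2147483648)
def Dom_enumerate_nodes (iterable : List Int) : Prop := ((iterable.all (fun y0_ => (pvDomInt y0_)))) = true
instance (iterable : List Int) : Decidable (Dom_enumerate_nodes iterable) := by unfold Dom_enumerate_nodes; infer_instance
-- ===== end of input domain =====

-- B replaces A's len-then-enumerate pass by a streaming one-element-lookahead pass (alternative decomposition, same return value).

-- ===== PORT A =====
-- the for loop: counter i, each item yields (if i == last then -1 else i, item)
def enumerateNodesGo (last : Int) (i : Int) : List Int → List (Int × Int)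
  | [] => []
  | x :: xs => ((if i = last then -1 else i), x) :: enumerateNodesGo last (i + 1) xs

def enumerate_nodes (iterable : List Int) : List (Int × Int) :=
  enumerateNodesGo ((iterable.length : Int) - 1) 0 iterable

-- ===== PORT B =====
-- lookahead buffer `prev`, counter i; on exhaustion emit (-1, prev)
def enumerateNodesAltGo (i : Int) (prev : Int) : List Int → List (Int × Int)
  | [] => [(-1, prev)]
  | x :: xs => (i, prev) :: enumerateNodesAltGo (i + 1) x xs

def enumerate_nodes_alt : List Int → List (Int × Int)
  | [] => []
  | x :: xs => enumerateNodesAltGo 0 x xs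

-- ===== PRECONDITION & SPEC =====
def Spec_enumerate_nodes (iterable : List Int) (out : List (Int × Int)) : Prop := out = enumerate_nodes_alt iterable
instance (iterable : List Int) (out : List (Int × Int)) : Decidable (Spec_enumerate_nodes iterable out) := by unfold Spec_enumerate_nodes; infer_instance

-- ===== CLAIM (what is proved, stated in full; the proofs are below) =====
def Claim_equal_enumerate_nodes : Prop := ∀ (iterable : List Int), Dom_enumerate_nodes iterable → Spec_enumerate_nodes iterable (enumerate_nodes iterable)

-- ===== LEMMAS AND PROOFS =====
theorem enumerateNodesGo_eq_altGo (xs : List Int) : ∀ (i last : Int) (prev : Int),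
    last = i + (xs.length : Int) →
    enumerateNodesGo last i (prev :: xs) = enumerateNodesAltGo i prev xs := by
  induction xs with
  | nil =>
    intro i last prev h
    simp [enumerateNodesGo, enumerateNodesAltGo] at h ⊢
    omega
  | cons x xs ih =>
    intro i last prev h
    have hne : i ≠ last := by simp at h; omega
    simp [enumerateNodesGo, enumerateNodesAltGo, hne]
    exact ih (i + 1) last x (by simp at h ⊢; omega)

-- ===== VERDICT (by name: the statement is the Claim_ definition above) =====
theorem enumerate_nodes_spec : Claim_equal_enumerate_nodes := by
  intro iterable _
  unfold Spec_enumerate_nodes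
  cases iterable with
  | nil => rfl
  | cons x xs =>
    show enumerateNodesGo _ 0 (x :: xs) = enumerate_nodes_alt (x :: xs)
    rw [enumerate_nodes_alt]
    exact enumerateNodesGo_eq_altGo xs 0 _ x (by simp)
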